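-- pv_equiv track=rewrite | github.com/Hosanguyen/Python | PY01024.py | check
-- ===== SOURCE A (Python) =====
-- def check(n):
--     sum = 0
--     sau = n%10
--     n//=10
--     sum += sau
--     while(n>0):
--         truoc = n%10
--         n//=10
--         if(abs(truoc-sau)!=2):
--             return False
--         sau = truoc
--         sum += truoc
--     if(sum%10!=0):
--         return False
--     return True
-- ===== SOURCE B (Python) =====
-- def check(n):
--     digits = [n % 10]
--     n //= 10
--     while n > 0:
--         digits.append(n % 10)
--         n //= 10
--     return all(abs(a - b) == 2 for a, b in zip(digits, digits[1:])) and sum(digits) % 10 == 0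
-- ===== Notes on version B (the rewrite author's own statement) =====
-- stated objective: simpler
-- what changed: A fuses extraction, adjacency test with early return and running sum into one stateful while loop; B first builds the digit list arithmetically, then checks adjacency with a pairwise zip and the digit-sum condition with sum().
import Mathlib
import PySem

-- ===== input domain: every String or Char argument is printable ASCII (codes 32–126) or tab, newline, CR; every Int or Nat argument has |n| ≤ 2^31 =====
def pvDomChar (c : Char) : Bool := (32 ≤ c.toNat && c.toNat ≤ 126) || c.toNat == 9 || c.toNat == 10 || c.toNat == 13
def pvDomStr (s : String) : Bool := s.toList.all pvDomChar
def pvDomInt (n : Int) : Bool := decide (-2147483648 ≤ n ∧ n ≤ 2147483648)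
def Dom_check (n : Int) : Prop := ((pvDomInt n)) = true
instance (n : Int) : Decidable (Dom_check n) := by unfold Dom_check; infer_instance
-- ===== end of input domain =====

-- B replaces A's fused early-return while loop by build-digit-list, then pairwise zip + sum (objective: simpler).

-- ===== PORT A =====
-- the while loop of A: state (n, sau, sum); after the loop the sum test
def checkLoop (n sau sum : Int) : Bool :=
  if h : n > 0 then
    let truoc := PySem.Int.mod n 10
    if |truoc - sau| ≠ 2 then false
    else checkLoop (PySem.Int.floordiv n 10) truoc (sum + truoc)
  else if PySem.Int.mod sum 10 ≠ 0 then false else true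
termination_by n.toNat
decreasing_by
  have : PySem.Int.floordiv n 10 = n / 10 := PySem.Int.floordiv_eq_ediv_of_pos (by omega)
  rw [this]; omega

def check (n : Int) : Bool :=
  let sau := PySem.Int.mod n 10
  checkLoop (PySem.Int.floordiv n 10) sau (0 + sau)

-- ===== PORT B =====
-- the while loop of B: collect remaining digits (n already floor-divided once)
def digitsLoop (n : Int) : List Int :=
  if h : n > 0 then PySem.Int.mod n 10 :: digitsLoop (PySem.Int.floordiv n 10)
  else []
termination_by n.toNat
decreasing_by
  have : PySem.Int.floordiv n 10 = n / 10 := PySem.Int.floordiv_eq_ediv_of_pos (by omega)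
  rw [this]; omega

def pairAll (digits : List Int) : Bool :=
  (digits.zip digits.tail).all (fun p => decide (|p.1 - p.2| = 2))

def check_alt (n : Int) : Bool :=
  let digits := PySem.Int.mod n 10 :: digitsLoop (PySem.Int.floordiv n 10)
  pairAll digits && decide (PySem.Int.mod digits.sum 10 = 0)

-- ===== PRECONDITION & SPEC =====
def Spec_check (n : Int) (out : Bool) : Prop := out = check_alt n
instance (n : Int) (out : Bool) : Decidable (Spec_check n out) := by unfold Spec_check; infer_instance

-- ===== CLAIM (what is proved, stated in full; the proofs are below) =====
def Claim_equal_check : Prop := ∀ (n : Int), Dom_check n → Spec_check n (check n)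

-- ===== LEMMAS AND PROOFS =====

theorem pairAll_single (a : Int) : pairAll [a] = true := by
  simp [pairAll]

theorem pairAll_cons₂ (a b : Int) (t : List Int) :
    pairAll (a :: b :: t) = (decide (|a - b| = 2) && pairAll (b :: t)) := by
  simp [pairAll]

theorem checkLoop_eq (n sau sum : Int) :
    checkLoop n sau sum =
      (pairAll (sau :: digitsLoop n) &&
        decide (PySem.Int.mod (sum + (digitsLoop n).sum) 10 = 0)) := by
  induction n, sau, sum using checkLoop.induct with
  | case1 n sau sum h truoc hne =>
      rw [checkLoop, digitsLoop]
      simp only [dif_pos h]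
      rw [if_pos hne, pairAll_cons₂]
      have h2 : decide (|sau - PySem.Int.mod n 10| = 2) = false := by
        simp only [decide_eq_false_iff_not]
        rw [abs_sub_comm]
        exact hne
      rw [h2]
      simp
  | case2 n sau sum h truoc hne ih =>
      rw [checkLoop, digitsLoop]
      simp only [dif_pos h]
      rw [if_neg hne, ih, pairAll_cons₂]
      have h2 : decide (|sau - PySem.Int.mod n 10| = 2) = true := by
        simp only [decide_eq_true_eq]
        rw [abs_sub_comm]
        exact not_ne_iff.mp hne
      rw [h2]
      simp only [List.sum_cons, Bool.true_and, ← add_assoc]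
      rfl
  | case3 n sau sum h hm =>
      rw [checkLoop, digitsLoop]
      simp only [dif_neg h]
      rw [if_pos hm, pairAll_single]
      have h2 : decide (PySem.Int.mod (sum + ([] : List Int).sum) 10 = 0) = false := by
        simp only [List.sum_nil, add_zero, decide_eq_false_iff_not]
        exact hm
      rw [h2]
      simp
  | case4 n sau sum h hm =>
      rw [checkLoop, digitsLoop]
      simp only [dif_neg h]
      rw [if_neg hm, pairAll_single]
      have h2 : decide (PySem.Int.mod (sum + ([] : List Int).sum) 10 = 0) = true := by
        simp only [List.sum_nil, add_zero, decide_eq_true_eq]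
        exact not_ne_iff.mp hm
      rw [h2]
      simp

-- ===== VERDICT (by name: the statement is the Claim_ definition above) =====
theorem check_spec : Claim_equal_check := by
  intro n _
  show check n = check_alt n
  rw [check, check_alt, checkLoop_eq]
  simp [List.sum_cons]
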